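-- pv_equiv track=rewrite | github.com/AZarenejad/The-Theory-of-Formal-Languages-and-Automata---UT-CE---Spring-2019---Computer-Assignment | removing_useless.py | delete_unreachable_variable_form_s
-- ===== SOURCE A (Python) =====
-- from collections import defaultdict
-- import string
--
-- class Graph:
--     def __init__(self):
--         self.graph = defaultdict(set)
--     def addEdge(self,u,v):
--         self.graph[u].add(v)
--     def BFS(self, s):
--         visited={}
--         lst = list(string.ascii_uppercase)
--         for x in lst:
--             visited[x]=False
--         visited['#']= False
--         reachable=[]
--         queue = []
--         queue.append(s)
--         visited[s] = True
--         while queue: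
--             s = queue.pop(0)
--             reachable.append(s)
--             for i in self.graph[s]:
--                 if visited[i] == False:
--                     queue.append(i)
--                     visited[i] = True
--         return reachable
--
-- def delete_unreachable_variable_form_s(grammars):
--     dependency_graph = Graph()
--     for i in range(len(grammars)):
--         for j in range(1,len(grammars[i])):
--             for k in range(0,len(grammars[i][j])):
--                 if grammars[i][j][k].islower()==0 and grammars[i][j][k]!='#' :
--                     dependency_graph.addEdge(grammars[i][0],grammars[i][j][k])
--     reachable_variable = dependency_graph.BFS('S')
--     lst = []
--     for i in range(len(grammars)):
--         if grammars[i][0] not in reachable_variable: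
--             continue
--         else:
--             lst.append(grammars[i])
--     grammars=lst
--     return grammars
-- ===== SOURCE B (Python) =====
-- def delete_unreachable_variable_form_s(grammars):
--     # Saturation instead of graph+BFS: repeatedly sweep the rules, adding every
--     # non-lowercase, non-'#' symbol of a rule whose head is already reachable.
--     # 26 sweeps saturate: reachable symbols are single uppercase letters, so a
--     # new one can appear in at most 26 consecutive sweeps.
--     reach = {'S'}
--     for _ in range(26):
--         for rule in grammars:
--             if rule[0] in reach:
--                 for prod in rule[1:]:
--                     for ch in prod:
--                         if not ch.islower() and ch != '#':
--                             reach.add(ch)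
--     return [rule for rule in grammars if rule[0] in reach]
-- ===== Notes on version B (the rewrite author's own statement) =====
-- stated objective: alternative
-- what changed: B replaces A's explicit dependency graph (defaultdict of sets, one set-insert per symbol of every rule) plus FIFO-queue BFS with a graph-free fixpoint saturation: at most 26 sweeps over the rules, each adding the variable symbols of rules whose head is already reachable, then a single filter of the original list.
import Mathlib
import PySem

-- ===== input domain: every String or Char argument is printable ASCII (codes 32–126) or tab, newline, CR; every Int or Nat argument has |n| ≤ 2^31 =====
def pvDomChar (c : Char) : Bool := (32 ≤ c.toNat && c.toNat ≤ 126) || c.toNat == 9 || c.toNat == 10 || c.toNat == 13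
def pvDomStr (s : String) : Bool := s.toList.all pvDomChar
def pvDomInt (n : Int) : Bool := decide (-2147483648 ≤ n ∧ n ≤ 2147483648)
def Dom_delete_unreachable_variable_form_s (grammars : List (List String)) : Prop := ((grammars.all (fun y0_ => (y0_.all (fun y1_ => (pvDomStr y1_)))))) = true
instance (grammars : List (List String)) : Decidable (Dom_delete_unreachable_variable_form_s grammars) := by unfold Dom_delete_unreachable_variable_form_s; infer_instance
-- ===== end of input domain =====

-- B replaces A's dependency graph + FIFO BFS by a graph-free fixpoint saturation
-- (at most 26 sweeps over the rules) and a single filter; same return value on Pre_.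

-- shared symbol test: Python's `ch.islower()==0 and ch != '#'`
def pvSym (c : Char) : Bool := !(PySem.Chars.islower c) && c != '#'

-- ===== PORT A =====
def pvAddEdge (g : PySem.Dict String (PySem.Set String)) (u v : String) :
    PySem.Dict String (PySem.Set String) :=
  g.insert u (PySem.Set.add (g.getD u PySem.Set.empty) v)

def pvBuildGraph (grammars : List (List String)) : PySem.Dict String (PySem.Set String) :=
  grammars.foldl (fun g rule =>
    (rule.drop 1).foldl (fun g prod =>
      prod.toList.foldl (fun g c =>
        if pvSym c then pvAddEdge g (rule.headD "") (String.singleton c) else g) g) g)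
    PySem.Dict.empty

-- visited = {'A':False, …, 'Z':False, '#':False}
def pvVisited0 : PySem.Dict String Bool :=
  (("ABCDEFGHIJKLMNOPQRSTUVWXYZ".toList).foldl
    (fun d x => d.insert (String.singleton x) false) PySem.Dict.empty).insert "#" false

-- one neighbour of the BFS inner loop: enqueue + mark if unvisited
def pvBFSstep (st : List String × PySem.Dict String Bool) (i : String) :
    List String × PySem.Dict String Bool :=
  if st.2.getD i true == false then (st.1 ++ [i], st.2.insert i true) else st

-- the `while queue:` loop (fuel only makes it total; under Pre_ it never runs out: ≤ 27 marks)
def pvBFSloop (g : PySem.Dict String (PySem.Set String)) :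
    Nat → PySem.Dict String Bool → List String → List String → List String
  | 0, _, _, reachable => reachable
  | fuel+1, visited, queue, reachable =>
    match queue with
    | [] => reachable
    | s :: rest =>
      let st := (g.getD s PySem.Set.empty).foldl pvBFSstep (rest, visited)
      pvBFSloop g fuel st.2 st.1 (reachable ++ [s])

def delete_unreachable_variable_form_s (grammars : List (List String)) : List (List String) :=
  let g := pvBuildGraph grammars
  let reachable := pvBFSloop g 100 (pvVisited0.insert "S" true) ["S"] []
  grammars.foldl (fun lst rule =>
    if reachable.contains (rule.headD "") then lst ++ [rule] else lst) []

-- ===== PORT B =====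
-- one sweep over the rules of Source B's inner `for rule in grammars:` loop
def pvPassB (grammars : List (List String)) (reach : PySem.Set String) : PySem.Set String :=
  grammars.foldl (fun reach rule =>
    if PySem.Set.contains reach (rule.headD "") then
      (rule.drop 1).foldl (fun reach prod =>
        prod.toList.foldl (fun reach c =>
          if pvSym c then PySem.Set.add reach (String.singleton c) else reach) reach) reach
    else reach) reach

def delete_unreachable_variable_form_s_alt (grammars : List (List String)) : List (List String) :=
  let reach := (List.range 26).foldl (fun r _ => pvPassB grammars r) (PySem.Set.ofList ["S"])
  grammars.filter (fun rule => PySem.Set.contains reach (rule.headD ""))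

-- ===== PRECONDITION & SPEC =====
def pvLetters : List Char := "ABCDEFGHIJKLMNOPQRSTUVWXYZ".toList
def pvUB : List String := pvLetters.map String.singleton
-- a "good" symbol: a single uppercase letter (a key of A's `visited` other than '#')
def pvGoodS (v : String) : Bool := pvUB.contains v

-- the variable symbols reachable in one step from head u (as 1-char strings)
def pvTgts (grammars : List (List String)) (u : String) : List String :=
  grammars.flatMap (fun rule =>
    if rule.headD "" = u then
      (rule.drop 1).flatMap (fun prod => (prod.toList.filter pvSym).map String.singleton)
    else [])

def pvPassC (grammars : List (List String)) (R : PySem.Set String) : PySem.Set String :=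
  PySem.Set.update R (R.flatMap (pvTgts grammars))

def pvUniv (grammars : List (List String)) : List String :=
  "S" :: grammars.flatMap (fun rule =>
    (rule.drop 1).flatMap (fun prod => (prod.toList.filter pvSym).map String.singleton))

-- the heads reachable from "S" (a closed-form saturation over pvTgts, used only to STATE Pre_)
def pvReach (grammars : List (List String)) : List String :=
  (pvPassC grammars)^[(pvUniv grammars).length] ["S"]

-- Pre_ excludes exactly the inputs where the Python A raises: a grammar containing an
-- empty rule (IndexError at grammars[i][0]) or one where some head reachable from 'S'
-- has a non-uppercase-letter, non-'#' symbol (KeyError at visited[i] in the BFS).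
def Pre_delete_unreachable_variable_form_s (grammars : List (List String)) : Prop :=
  (∀ rule ∈ grammars, rule ≠ []) ∧
  (∀ u ∈ pvReach grammars, ∀ v ∈ pvTgts grammars u, pvGoodS v = true)
instance (grammars : List (List String)) :
    Decidable (Pre_delete_unreachable_variable_form_s grammars) := by
  unfold Pre_delete_unreachable_variable_form_s; infer_instance

def pvWitness_delete_unreachable_variable_form_s : List (List String) :=
  [["S", "aA"], ["A", "a"], ["B", "b"]]

def Spec_delete_unreachable_variable_form_s (grammars : List (List String)) (out : List (List String)) : Prop := out = delete_unreachable_variable_form_s_alt grammars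
instance (grammars : List (List String)) (out : List (List String)) : Decidable (Spec_delete_unreachable_variable_form_s grammars out) := by unfold Spec_delete_unreachable_variable_form_s; infer_instance

-- ===== CLAIM (what is proved, stated in full; the proofs are below) =====
def Claim_equal_delete_unreachable_variable_form_s : Prop := ∀ (grammars : List (List String)), Dom_delete_unreachable_variable_form_s grammars → Pre_delete_unreachable_variable_form_s grammars → Spec_delete_unreachable_variable_form_s grammars (delete_unreachable_variable_form_s grammars)

-- ===== LEMMAS AND PROOFS =====

-- the edge relation: v is a variable symbol of a rule with head u
def pvEdge (grammars : List (List String)) (u v : String) : Prop := v ∈ pvTgts grammars u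

-- reachability from "S"
def pvRch (grammars : List (List String)) (x : String) : Prop :=
  Relation.ReflTransGen (pvEdge grammars) "S" x

-- membership in an if-then-else-nil list
theorem pv_mem_if {c : Prop} [Decidable c] (X : List String) (v : String) :
    v ∈ (if c then X else []) ↔ c ∧ v ∈ X := by
  split_ifs with h <;> simp [h]

theorem pv_mem_tgts (grammars : List (List String)) (u v : String) :
    v ∈ pvTgts grammars u ↔ ∃ r ∈ grammars, r.headD "" = u ∧
      ∃ p ∈ r.drop 1, ∃ c ∈ p.toList, pvSym c = true ∧ v = String.singleton c := by
  simp only [pvTgts, List.mem_flatMap, pv_mem_if, List.mem_map, List.mem_filter]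
  constructor
  · rintro ⟨r, hr, hc, p, hp, c, ⟨hcl, hsym⟩, rfl⟩
    exact ⟨r, hr, hc, p, hp, c, hcl, hsym, rfl⟩
  · rintro ⟨r, hr, hc, p, hp, c, hcl, hsym, rfl⟩
    exact ⟨r, hr, hc, p, hp, c, ⟨hcl, hsym⟩, rfl⟩

theorem pv_mem_tgts_univ {grammars : List (List String)} {u v : String}
    (h : v ∈ pvTgts grammars u) : v ∈ pvUniv grammars := by
  rw [pv_mem_tgts] at h
  obtain ⟨r, hr, _, p, hp, c, hcl, hsym, rfl⟩ := h
  simp only [pvUniv, List.mem_cons, List.mem_flatMap, List.mem_map, List.mem_filter]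
  exact Or.inr ⟨r, hr, p, hp, c, ⟨hcl, hsym⟩, rfl⟩

theorem pv_mem_tgts_intro {grammars : List (List String)} {rule : List String}
    {prod : String} {c : Char} (hrule : rule ∈ grammars) (hprod : prod ∈ rule.drop 1)
    (hc : c ∈ prod.toList) (hsym : pvSym c = true) :
    String.singleton c ∈ pvTgts grammars (rule.headD "") := by
  rw [pv_mem_tgts]
  exact ⟨rule, hrule, rfl, prod, hprod, c, hc, hsym, rfl⟩

-- ---- generic saturation-to-closure lemma ----
theorem pv_sat (pass : List String → List String) (E : String → String → Prop)
    (U : List String) (Inv : List String → Prop)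
    (hbase : Inv ["S"])
    (hstep : ∀ R, Inv R → Inv (pass R))
    (hnd : ∀ R, Inv R → R.Nodup)
    (hsub : ∀ R, Inv R → ∀ x ∈ R, x ∈ U)
    (hsound : ∀ R, Inv R → ∀ x ∈ R, Relation.ReflTransGen E "S" x)
    (happ : ∀ R, Inv R → ∃ t, pass R = R ++ t)
    (hclosed : ∀ R, Inv R → pass R = R → ∀ u ∈ R, ∀ v, E u v → v ∈ R)
    (N : Nat) (hN : U.toFinset.card ≤ N) :
    ∀ x, x ∈ pass^[N] ["S"] ↔ Relation.ReflTransGen E "S" x := by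
  have hP : ∀ k, Inv (pass^[k] ["S"]) := by
    intro k; induction k with
    | zero => simpa using hbase
    | succ k ih => rw [Function.iterate_succ_apply']; exact hstep _ ih
  intro x
  constructor
  · exact fun hx => hsound _ (hP N) x hx
  · intro hx
    have hfix : ∃ k, k < N ∧ pass (pass^[k] ["S"]) = pass^[k] ["S"] := by
      by_contra hcon
      push Not at hcon
      have hlen : ∀ k, k ≤ N → k + 1 ≤ (pass^[k] ["S"]).length := by
        intro k hk
        induction k with
        | zero => simp
        | succ k ih =>
          have hk' : k < N := by omega
          obtain ⟨t, ht⟩ := happ _ (hP k)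
          have htne : t ≠ [] := by
            intro h0; exact hcon k hk' (by rw [ht, h0, List.append_nil])
          have hlen1 : (pass^[k+1] ["S"]).length = (pass^[k] ["S"]).length + t.length := by
            rw [Function.iterate_succ_apply', ht, List.length_append]
          have h1 : 1 ≤ t.length := by
            cases t with
            | nil => exact absurd rfl htne
            | cons a t => simp
          have := ih (by omega)
          omega
      have hNlen := hlen N le_rfl
      have hcard : (pass^[N] ["S"]).length ≤ U.toFinset.card := by
        rw [← List.toFinset_card_of_nodup (hnd _ (hP N))]
        exact Finset.card_le_card (fun a ha =>
          List.mem_toFinset.mpr (hsub _ (hP N) a (List.mem_toFinset.mp ha)))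
      omega
    obtain ⟨k, hkN, hfixk⟩ := hfix
    have hstab : ∀ m, pass^[m] (pass^[k] ["S"]) = pass^[k] ["S"] := by
      intro m; induction m with
      | zero => rfl
      | succ m ih => rw [Function.iterate_succ_apply', ih, hfixk]
    have hPN : pass^[N] ["S"] = pass^[k] ["S"] := by
      have hNk : N = (N - k) + k := by omega
      rw [hNk, Function.iterate_add_apply]; exact hstab _
    have hSmem : ∀ m, "S" ∈ pass^[m] ["S"] := by
      intro m; induction m with
      | zero => simp
      | succ m ih =>
        obtain ⟨t, ht⟩ := happ _ (hP m)
        rw [Function.iterate_succ_apply', ht]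
        exact List.mem_append_left _ ih
    rw [hPN]
    induction hx with
    | refl => exact hSmem k
    | tail h e ih => exact hclosed _ (hP k) hfixk _ ih _ e

-- pvReach computes exactly reachability
theorem pvReach_iff (grammars : List (List String)) :
    ∀ x, x ∈ pvReach grammars ↔ pvRch grammars x := by
  have hbase : (["S"] : List String).Nodup ∧ (∀ x ∈ ["S"], x ∈ pvUniv grammars) ∧
      (∀ x ∈ ["S"], pvRch grammars x) := by
    refine ⟨by simp, ?_, ?_⟩
    · intro x hx; simp only [List.mem_singleton] at hx; subst hx
      exact List.mem_cons_self
    · intro x hx; simp only [List.mem_singleton] at hx; subst hx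
      exact Relation.ReflTransGen.refl
  have hstep : ∀ R, (R.Nodup ∧ (∀ x ∈ R, x ∈ pvUniv grammars) ∧ (∀ x ∈ R, pvRch grammars x)) →
      ((pvPassC grammars R).Nodup ∧ (∀ x ∈ pvPassC grammars R, x ∈ pvUniv grammars) ∧
        (∀ x ∈ pvPassC grammars R, pvRch grammars x)) := by
    rintro R ⟨h1, h2, h3⟩
    refine ⟨PySem.Set.nodup_update R _ h1, ?_, ?_⟩
    · intro x hx
      rcases (PySem.Set.mem_update R _ x).mp hx with h | h
      · exact h2 x h
      · obtain ⟨u, hu, hx'⟩ := List.mem_flatMap.mp h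
        exact pv_mem_tgts_univ hx'
    · intro x hx
      rcases (PySem.Set.mem_update R _ x).mp hx with h | h
      · exact h3 x h
      · obtain ⟨u, hu, hx'⟩ := List.mem_flatMap.mp h
        exact Relation.ReflTransGen.tail (h3 u hu) hx'
  have happ : ∀ R, (R.Nodup ∧ (∀ x ∈ R, x ∈ pvUniv grammars) ∧ (∀ x ∈ R, pvRch grammars x)) →
      ∃ t, pvPassC grammars R = R ++ t :=
    fun R _ => ⟨_, PySem.Set.update_eq_append_filter R _⟩
  have hclosed : ∀ R, (R.Nodup ∧ (∀ x ∈ R, x ∈ pvUniv grammars) ∧ (∀ x ∈ R, pvRch grammars x)) →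
      pvPassC grammars R = R → ∀ u ∈ R, ∀ v, pvEdge grammars u v → v ∈ R := by
    intro R _ hfixR u hu v hv
    have hmem : v ∈ pvPassC grammars R :=
      (PySem.Set.mem_update R _ v).mpr (Or.inr (List.mem_flatMap.mpr ⟨u, hu, hv⟩))
    rwa [hfixR] at hmem
  exact pv_sat (pvPassC grammars) (pvEdge grammars) (pvUniv grammars)
    (fun R => R.Nodup ∧ (∀ x ∈ R, x ∈ pvUniv grammars) ∧ (∀ x ∈ R, pvRch grammars x))
    hbase hstep (fun R h => h.1) (fun R h => h.2.1) (fun R h => h.2.2) happ hclosed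
    (pvUniv grammars).length (List.toFinset_card_le _)

-- ---- fold helper lemmas ----
theorem pv_foldl_prefix {β : Type} (f : List String → β → List String)
    (hext : ∀ s b, s <+: f s b) :
    ∀ (l : List β) (s : List String), s <+: l.foldl f s := by
  intro l
  induction l with
  | nil => intro s; exact List.prefix_rfl
  | cons b l ih => intro s; exact (hext s b).trans (ih (f s b))

theorem pv_foldl_hit {β : Type} (f : List String → β → List String)
    (hext : ∀ s b, s <+: f s b) (v : String) (b0 : β) :
    ∀ (l : List β) (s : List String), b0 ∈ l → (∀ s', s <+: s' → v ∈ f s' b0) →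
      v ∈ l.foldl f s := by
  intro l
  induction l with
  | nil => intro s h; cases h
  | cons b l ih =>
    intro s hb hhit
    rcases List.mem_cons.mp hb with heq | hb'
    · subst heq
      have hv : v ∈ f s b0 := hhit s List.prefix_rfl
      have hpre : f s b0 <+: l.foldl f (f s b0) := pv_foldl_prefix f hext l _
      simpa using hpre.subset hv
    · have := ih (f s b) hb' (fun s' hs' => hhit s' ((hext s b).trans hs'))
      simpa using this

theorem pv_foldl_inv {β : Type} (P : List String → Prop) (f : List String → β → List String) :
    ∀ (l : List β), (∀ s b, b ∈ l → P s → P (f s b)) → ∀ s, P s → P (l.foldl f s) := by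
  intro l
  induction l with
  | nil => intro _ s hs; simpa using hs
  | cons b l ih =>
    intro h s hs
    have := ih (fun s b hb hs => h s b (List.mem_cons_of_mem _ hb) hs) (f s b)
      (h s b List.mem_cons_self hs)
    simpa using this


-- ---- B side: the saturation sweep computes reachability ----
theorem pv_cf_ext (s : PySem.Set String) (prod : String) :
    s <+: prod.toList.foldl (fun reach c =>
      if pvSym c then PySem.Set.add reach (String.singleton c) else reach) s := by
  apply pv_foldl_prefix
  intro s c
  split_ifs with h
  · rw [PySem.Set.add_eq_ite]
    split_ifs with h2
    · exact List.prefix_rfl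
    · exact List.prefix_append s _
  · exact List.prefix_rfl

theorem pv_pf_ext (s : PySem.Set String) (rule : List String) :
    s <+: (rule.drop 1).foldl (fun reach prod =>
      prod.toList.foldl (fun reach c =>
        if pvSym c then PySem.Set.add reach (String.singleton c) else reach) reach) s :=
  pv_foldl_prefix _ (fun s prod => pv_cf_ext s prod) _ s

theorem pv_passB_ext (grammars : List (List String)) (R : PySem.Set String) :
    R <+: pvPassB grammars R := by
  apply pv_foldl_prefix
  intro s rule
  split_ifs with h
  · exact pv_pf_ext s rule
  · exact List.prefix_rfl

-- one sweep preserves the invariant (Pre_'s goodness is what keeps elements in pvUB)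
theorem pv_passB_inv (grammars : List (List String))
    (hPre2 : ∀ u, pvRch grammars u → ∀ v ∈ pvTgts grammars u, pvGoodS v = true)
    (R : PySem.Set String)
    (h : R.Nodup ∧ (∀ x ∈ R, x ∈ pvUB) ∧ (∀ x ∈ R, pvRch grammars x)) :
    (pvPassB grammars R).Nodup ∧ (∀ x ∈ pvPassB grammars R, x ∈ pvUB) ∧
      (∀ x ∈ pvPassB grammars R, pvRch grammars x) := by
  unfold pvPassB
  apply pv_foldl_inv
    (fun s => s.Nodup ∧ (∀ x ∈ s, x ∈ pvUB) ∧ (∀ x ∈ s, pvRch grammars x))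
  · intro s rule hrule hs
    split_ifs with hc
    · -- head of rule is already reachable
      have hhead : pvRch grammars (rule.headD "") :=
        hs.2.2 _ ((PySem.Set.contains_iff s _).mp hc)
      apply pv_foldl_inv
        (fun s => s.Nodup ∧ (∀ x ∈ s, x ∈ pvUB) ∧ (∀ x ∈ s, pvRch grammars x))
      · intro s prod hprod hs'
        apply pv_foldl_inv
          (fun s => s.Nodup ∧ (∀ x ∈ s, x ∈ pvUB) ∧ (∀ x ∈ s, pvRch grammars x))
        · intro s c hcmem hs''
          split_ifs with hsym
          · have htgt : String.singleton c ∈ pvTgts grammars (rule.headD "") :=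
              pv_mem_tgts_intro hrule hprod hcmem hsym
            refine ⟨PySem.Set.nodup_add s _ hs''.1, ?_, ?_⟩
            · intro x hx
              rcases (PySem.Set.mem_add s _ x).mp hx with h | h
              · exact hs''.2.1 x h
              · subst h
                have := hPre2 _ hhead _ htgt
                simpa [pvGoodS] using this
            · intro x hx
              rcases (PySem.Set.mem_add s _ x).mp hx with h | h
              · exact hs''.2.2 x h
              · subst h; exact Relation.ReflTransGen.tail hhead htgt
          · exact hs''
        · exact hs'
      · exact hs
    · exact hs
  · exact h

theorem pv_passB_lower (grammars : List (List String)) (R : PySem.Set String)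
    {u v : String} (hu : u ∈ R) (hv : v ∈ pvTgts grammars u) :
    v ∈ pvPassB grammars R := by
  rw [pv_mem_tgts] at hv
  obtain ⟨rule, hrule, hhead, prod, hprod, c, hc, hsym, rfl⟩ := hv
  unfold pvPassB
  apply pv_foldl_hit _ ?hext _ rule _ _ hrule
  · intro s' hs'
    have hc' : PySem.Set.contains s' (rule.headD "") = true :=
      (PySem.Set.contains_iff s' _).mpr (hs'.subset (hhead ▸ hu))
    rw [if_pos hc']
    apply pv_foldl_hit _ (fun s prod => pv_cf_ext s prod) _ prod _ _ hprod
    intro s'' _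
    apply pv_foldl_hit _ ?hext2 _ c _ _ hc
    · intro s3 _
      rw [if_pos hsym]
      exact (PySem.Set.mem_add s3 _ _).mpr (Or.inr rfl)
    case hext2 =>
      intro s c
      split_ifs with h
      · rw [PySem.Set.add_eq_ite]; split_ifs with h2
        · exact List.prefix_rfl
        · exact List.prefix_append s _
      · exact List.prefix_rfl
  case hext =>
    intro s rule
    split_ifs with h
    · exact pv_pf_ext s rule
    · exact List.prefix_rfl

theorem pv_B_iff (grammars : List (List String))
    (hPre2 : ∀ u, pvRch grammars u → ∀ v ∈ pvTgts grammars u, pvGoodS v = true) :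
    ∀ x, x ∈ (pvPassB grammars)^[26] ["S"] ↔ pvRch grammars x := by
  have hbase : (["S"] : List String).Nodup ∧ (∀ x ∈ ["S"], x ∈ pvUB) ∧
      (∀ x ∈ ["S"], pvRch grammars x) := by
    refine ⟨by simp, ?_, ?_⟩
    · intro x hx; simp only [List.mem_singleton] at hx; subst hx; decide
    · intro x hx; simp only [List.mem_singleton] at hx; subst hx
      exact Relation.ReflTransGen.refl
  have hclosed : ∀ R, (R.Nodup ∧ (∀ x ∈ R, x ∈ pvUB) ∧ (∀ x ∈ R, pvRch grammars x)) →
      pvPassB grammars R = R → ∀ u ∈ R, ∀ v, pvEdge grammars u v → v ∈ R := by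
    intro R _ hfixR u hu v hv
    have := pv_passB_lower grammars R hu hv
    rwa [hfixR] at this
  exact pv_sat (pvPassB grammars) (pvEdge grammars) pvUB
    (fun R => R.Nodup ∧ (∀ x ∈ R, x ∈ pvUB) ∧ (∀ x ∈ R, pvRch grammars x))
    hbase (pv_passB_inv grammars hPre2) (fun R h => h.1) (fun R h => h.2.1) (fun R h => h.2.2)
    (fun R _ => by obtain ⟨t, ht⟩ := pv_passB_ext grammars R; exact ⟨t, ht.symm⟩) hclosed
    26 (le_trans (List.toFinset_card_le _) (by decide))

theorem pv_range_foldl {α : Type} (f : α → α) :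
    ∀ (n : Nat) (s : α), (List.range n).foldl (fun r _ => f r) s = f^[n] s := by
  intro n
  induction n with
  | zero => intro s; rfl
  | succ n ih =>
    intro s
    rw [List.range_succ, List.foldl_append, ih, Function.iterate_succ_apply']
    rfl


-- ---- A side: the built graph's adjacency is pvTgts ----
theorem pv_addEdge_getD (g : PySem.Dict String (PySem.Set String)) (h w u : String) :
    (pvAddEdge g h w).getD u PySem.Set.empty =
      if u = h then PySem.Set.add (g.getD h PySem.Set.empty) w
      else g.getD u PySem.Set.empty := by
  unfold pvAddEdge
  rw [PySem.Dict.getD_insert]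

theorem pv_graph_L1 (h : String) :
    ∀ (cs : List Char) (g : PySem.Dict String (PySem.Set String)) (u v : String),
      v ∈ (cs.foldl (fun g c =>
          if pvSym c then pvAddEdge g h (String.singleton c) else g) g).getD u PySem.Set.empty ↔
      v ∈ g.getD u PySem.Set.empty ∨
        (u = h ∧ ∃ c ∈ cs, pvSym c = true ∧ v = String.singleton c) := by
  intro cs
  induction cs with
  | nil => intro g u v; simp
  | cons c cs ih =>
    intro g u v
    rw [List.foldl_cons, ih]
    by_cases hsym : pvSym c = true
    · rw [if_pos hsym, pv_addEdge_getD]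
      by_cases hu : u = h
      · subst hu
        rw [if_pos rfl, PySem.Set.mem_add]
        constructor
        · rintro ((h1 | h1) | ⟨-, c', hc', hs', hv'⟩)
          · exact Or.inl h1
          · exact Or.inr ⟨rfl, c, List.mem_cons_self, hsym, h1⟩
          · exact Or.inr ⟨rfl, c', List.mem_cons_of_mem _ hc', hs', hv'⟩
        · rintro (h1 | ⟨-, c', hc', hs', hv'⟩)
          · exact Or.inl (Or.inl h1)
          · rcases List.mem_cons.mp hc' with heq | hc''
            · subst heq; exact Or.inl (Or.inr hv')
            · exact Or.inr ⟨rfl, c', hc'', hs', hv'⟩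
      · rw [if_neg hu]
        constructor
        · rintro (h1 | ⟨hu', rest⟩)
          · exact Or.inl h1
          · exact absurd hu' hu
        · rintro (h1 | ⟨hu', rest⟩)
          · exact Or.inl h1
          · exact absurd hu' hu
    · rw [if_neg hsym]
      constructor
      · rintro (h1 | ⟨hu, c', hc', hs', hv'⟩)
        · exact Or.inl h1
        · exact Or.inr ⟨hu, c', List.mem_cons_of_mem _ hc', hs', hv'⟩
      · rintro (h1 | ⟨hu, c', hc', hs', hv'⟩)
        · exact Or.inl h1
        · rcases List.mem_cons.mp hc' with heq | hc''
          · subst heq; exact absurd hs' hsym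
          · exact Or.inr ⟨hu, c', hc'', hs', hv'⟩

theorem pv_graph_L2 (h : String) :
    ∀ (ps : List String) (g : PySem.Dict String (PySem.Set String)) (u v : String),
      v ∈ (ps.foldl (fun g prod =>
          prod.toList.foldl (fun g c =>
            if pvSym c then pvAddEdge g h (String.singleton c) else g) g) g).getD u
            PySem.Set.empty ↔
      v ∈ g.getD u PySem.Set.empty ∨
        (u = h ∧ ∃ p ∈ ps, ∃ c ∈ p.toList, pvSym c = true ∧ v = String.singleton c) := by
  intro ps
  induction ps with
  | nil => intro g u v; simp
  | cons p ps ih =>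
    intro g u v
    rw [List.foldl_cons, ih, pv_graph_L1]
    constructor
    · rintro ((h1 | ⟨hu, c, hc, hs, hv⟩) | ⟨hu, p', hp', c, hc, hs, hv⟩)
      · exact Or.inl h1
      · exact Or.inr ⟨hu, p, List.mem_cons_self, c, hc, hs, hv⟩
      · exact Or.inr ⟨hu, p', List.mem_cons_of_mem _ hp', c, hc, hs, hv⟩
    · rintro (h1 | ⟨hu, p', hp', c, hc, hs, hv⟩)
      · exact Or.inl (Or.inl h1)
      · rcases List.mem_cons.mp hp' with heq | hp''
        · subst heq; exact Or.inl (Or.inr ⟨hu, c, hc, hs, hv⟩)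
        · exact Or.inr ⟨hu, p', hp'', c, hc, hs, hv⟩

theorem pv_mem_graph (grammars : List (List String)) (u v : String) :
    v ∈ (pvBuildGraph grammars).getD u PySem.Set.empty ↔ pvEdge grammars u v := by
  have main : ∀ (rs : List (List String)) (g : PySem.Dict String (PySem.Set String)),
      v ∈ (rs.foldl (fun g rule =>
          (rule.drop 1).foldl (fun g prod =>
            prod.toList.foldl (fun g c =>
              if pvSym c then pvAddEdge g (rule.headD "") (String.singleton c) else g) g) g)
          g).getD u PySem.Set.empty ↔
        v ∈ g.getD u PySem.Set.empty ∨
          ∃ r ∈ rs, u = r.headD "" ∧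
            ∃ p ∈ r.drop 1, ∃ c ∈ p.toList, pvSym c = true ∧ v = String.singleton c := by
    intro rs
    induction rs with
    | nil => intro g; simp
    | cons r rs ih =>
      intro g
      rw [List.foldl_cons, ih, pv_graph_L2]
      constructor
      · rintro ((h1 | ⟨hu, p, hp, c, hc, hs, hv⟩) | ⟨r', hr', hu, rest⟩)
        · exact Or.inl h1
        · exact Or.inr ⟨r, List.mem_cons_self, hu, p, hp, c, hc, hs, hv⟩
        · exact Or.inr ⟨r', List.mem_cons_of_mem _ hr', hu, rest⟩
      · rintro (h1 | ⟨r', hr', hu, rest⟩)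
        · exact Or.inl (Or.inl h1)
        · rcases List.mem_cons.mp hr' with heq | hr''
          · subst heq; exact Or.inl (Or.inr ⟨hu, rest⟩)
          · exact Or.inr ⟨r', hr'', hu, rest⟩
  unfold pvBuildGraph pvEdge
  rw [main, pv_mem_tgts]
  constructor
  · rintro (h1 | ⟨r, hr, hu, p, hp, c, hc, hs, hv⟩)
    · simp [PySem.Dict.getD_empty, PySem.Set.empty] at h1
    · exact ⟨r, hr, hu.symm, p, hp, c, hc, hs, hv⟩
  · rintro ⟨r, hr, hu, p, hp, c, hc, hs, hv⟩
    exact Or.inr ⟨r, hr, hu.symm, p, hp, c, hc, hs, hv⟩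


-- ---- A side: BFS machinery ----
def pvKeyList : List String := pvUB ++ ["#"]

-- number of still-unvisited keys (drives the fuel bound)
def pvFC (vis : PySem.Dict String Bool) : Nat :=
  (pvKeyList.filter (fun x => vis.get? x == some false)).length

theorem pv_filter_insert_lt (vis : PySem.Dict String Bool) (i : String)
    (hf : vis.get? i = some false) :
    ∀ (l : List String), l.Nodup → i ∈ l →
      ((l.filter (fun x => (vis.insert i true).get? x == some false)).length) + 1 ≤
        (l.filter (fun x => vis.get? x == some false)).length := by
  intro l
  induction l with
  | nil => intro _ h; cases h
  | cons a l ih =>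
    intro hnd ha
    have hnd' : l.Nodup := hnd.of_cons
    have hnew : ∀ y, ((vis.insert i true).get? i == some y) = (some true == some y) := by
      intro y; rw [PySem.Dict.get?_insert_self]
    rcases List.mem_cons.mp ha with heq | ha'
    · subst heq
      have hni : i ∉ l := (List.nodup_cons.mp hnd).1
      have heqf : l.filter (fun x => (vis.insert i true).get? x == some false) =
          l.filter (fun x => vis.get? x == some false) := by
        apply List.filter_congr
        intro x hx
        have hne : x ≠ i := fun h => hni (h ▸ hx)
        rw [PySem.Dict.get?_insert_of_ne _ _ hne]
      simp [hf, heqf]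
    · have hrec := ih hnd' ha'
      by_cases hax : a = i
      · subst hax
        simp only [List.filter_cons, hnew, hf]
        simpa using by omega
      · rw [List.filter_cons, List.filter_cons, PySem.Dict.get?_insert_of_ne _ _ hax]
        cases hb : (vis.get? a == some false) <;> simp <;> omega

theorem pv_fc_insert (vis : PySem.Dict String Bool) (i : String)
    (hf : vis.get? i = some false) (hk : i ∈ pvKeyList) :
    pvFC (vis.insert i true) + 1 ≤ pvFC vis :=
  pv_filter_insert_lt vis i hf pvKeyList (by decide) hk

theorem pv_fc_le (vis : PySem.Dict String Bool) : pvFC vis ≤ 27 :=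
  le_trans (List.length_filter_le _ _) (by decide)

-- initial visited dict facts
theorem pv_visited0_values : ∀ x b, pvVisited0.get? x = some b → b = false := by
  have gen : ∀ (l : List Char) (d : PySem.Dict String Bool),
      (∀ x b, d.get? x = some b → b = false) →
      ∀ x b, (l.foldl (fun d c => d.insert (String.singleton c) false) d).get? x = some b →
        b = false := by
    intro l
    induction l with
    | nil => intro d hd; simpa using hd
    | cons c l ih =>
      intro d hd
      apply ih
      intro x b hx
      by_cases hxc : x = String.singleton c
      · subst hxc; rw [PySem.Dict.get?_insert_self] at hx; cases hx; rfl
      · rw [PySem.Dict.get?_insert_of_ne _ _ hxc] at hx; exact hd x b hx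
  intro x b hx
  unfold pvVisited0 at hx
  by_cases hxh : x = "#"
  · subst hxh; rw [PySem.Dict.get?_insert_self] at hx; cases hx; rfl
  · rw [PySem.Dict.get?_insert_of_ne _ _ hxh] at hx
    exact gen _ PySem.Dict.empty (by intro x b h; rw [PySem.Dict.get?_empty] at h; cases h) x b hx

theorem pv_init_get?_true (x : String) :
    (pvVisited0.insert "S" true).get? x = some true ↔ x = "S" := by
  constructor
  · intro hx
    by_cases hxs : x = "S"
    · exact hxs
    · rw [PySem.Dict.get?_insert_of_ne _ _ hxs] at hx
      exact absurd (pv_visited0_values x true hx) (by simp)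
  · intro hx; subst hx; exact PySem.Dict.get?_insert_self _ _ _

theorem pv_init_keys : (pvVisited0.insert "S" true).keys = pvKeyList := by decide

theorem pv_init_contains (x : String) :
    (pvVisited0.insert "S" true).contains x = true ↔ x ∈ pvKeyList := by
  rw [PySem.Dict.contains_iff_mem_keys, pv_init_keys]

-- the queue only grows along the inner fold
theorem pv_fold_q_prefix : ∀ (ns : List String) (q : List String) (vis : PySem.Dict String Bool),
    q <+: (ns.foldl pvBFSstep (q, vis)).1 := by
  intro ns
  induction ns with
  | nil => intro q vis; exact List.prefix_rfl
  | cons i ns ih =>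
    intro q vis
    rw [List.foldl_cons]
    unfold pvBFSstep
    split_ifs with h
    · exact (List.prefix_append q [i]).trans (ih _ _)
    · exact ih _ _


-- the BFS inner fold preserves the invariant and marks every neighbour of s
theorem pv_fold (grammars : List (List String))
    (hPre2 : ∀ u, pvRch grammars u → ∀ v ∈ pvTgts grammars u, pvGoodS v = true)
    (s : String) (hRs : pvRch grammars s) (reachable' : List String) :
    ∀ (ns : List String), (∀ i ∈ ns, pvEdge grammars s i) →
    ∀ (q : List String) (vis : PySem.Dict String Bool),
      (∀ x, vis.get? x = some true ↔ (x ∈ reachable' ∨ x ∈ q)) →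
      (∀ x ∈ q, pvRch grammars x) →
      (∀ x, vis.contains x = true ↔ x ∈ pvKeyList) →
      ((∀ x, (ns.foldl pvBFSstep (q, vis)).2.get? x = some true ↔
          (x ∈ reachable' ∨ x ∈ (ns.foldl pvBFSstep (q, vis)).1)) ∧
       (∀ x ∈ (ns.foldl pvBFSstep (q, vis)).1, pvRch grammars x) ∧
       (∀ x, (ns.foldl pvBFSstep (q, vis)).2.contains x = true ↔ x ∈ pvKeyList) ∧
       (∀ i ∈ ns, (ns.foldl pvBFSstep (q, vis)).2.get? i = some true) ∧
       (∀ x, vis.get? x = some true → (ns.foldl pvBFSstep (q, vis)).2.get? x = some true) ∧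
       2 * pvFC (ns.foldl pvBFSstep (q, vis)).2 + (ns.foldl pvBFSstep (q, vis)).1.length ≤
         2 * pvFC vis + q.length) := by
  intro ns
  induction ns with
  | nil =>
    intro _ q vis C1 C2 C3
    refine ⟨C1, C2, C3, ?_, fun x hx => hx, le_rfl⟩
    intro i hi
    cases hi
  | cons i ns ih =>
    intro hns q vis C1 C2 C3
    have hns' : ∀ j ∈ ns, pvEdge grammars s j := fun j hj => hns j (List.mem_cons_of_mem _ hj)
    have hEi : pvEdge grammars s i := hns i List.mem_cons_self
    by_cases h : vis.getD i true = false
    · -- i is an unvisited key: enqueue and mark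
      have hstep : pvBFSstep (q, vis) i = (q ++ [i], vis.insert i true) := by
        unfold pvBFSstep; rw [if_pos (by simp [h])]
      have hfi : vis.get? i = some false := by
        have hgd := h
        rw [PySem.Dict.getD_eq_get?_getD] at hgd
        cases hgi : vis.get? i with
        | none => rw [hgi] at hgd; cases hgd
        | some b =>
          rw [hgi] at hgd
          simp only [Option.getD_some] at hgd
          rw [hgd]
      have hkey : i ∈ pvKeyList := by
        apply (C3 i).mp
        rw [PySem.Dict.contains_eq_isSome_get?, hfi]
        rfl
      have N1 : ∀ x, (vis.insert i true).get? x = some true ↔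
          (x ∈ reachable' ∨ x ∈ q ++ [i]) := by
        intro x
        by_cases hx : x = i
        · subst hx
          rw [PySem.Dict.get?_insert_self]
          simp
        · rw [PySem.Dict.get?_insert_of_ne _ _ hx, C1 x]
          simp [List.mem_append, hx]
      have N2 : ∀ x ∈ q ++ [i], pvRch grammars x := by
        intro x hx
        rcases List.mem_append.mp hx with h1 | h1
        · exact C2 x h1
        · simp only [List.mem_singleton] at h1; subst h1
          exact Relation.ReflTransGen.tail hRs hEi
      have N3 : ∀ x, (vis.insert i true).contains x = true ↔ x ∈ pvKeyList := by
        intro x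
        rw [PySem.Dict.contains_insert]
        by_cases hx : x = i
        · subst hx; simp [hkey]
        · have hbe : (x == i) = false := by simp [hx]
          rw [hbe, Bool.false_or]
          exact C3 x
      obtain ⟨G1, G2, G3, G4, G5, G6⟩ := ih hns' (q ++ [i]) (vis.insert i true) N1 N2 N3
      rw [List.foldl_cons, hstep]
      refine ⟨G1, G2, G3, ?_, ?_, ?_⟩
      · intro j hj
        rcases List.mem_cons.mp hj with heq | hj'
        · subst heq
          exact G5 j (PySem.Dict.get?_insert_self _ _ _)
        · exact G4 j hj'
      · intro x hx
        have hxi : x ≠ i := by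
          intro hh; subst hh; rw [hfi] at hx; cases hx
        exact G5 x (by rw [PySem.Dict.get?_insert_of_ne _ _ hxi]; exact hx)
      · have hfc := pv_fc_insert vis i hfi hkey
        have hlen : (q ++ [i]).length = q.length + 1 := by simp
        rw [hlen] at G6
        omega
    · -- i is already visited (or, being good, already marked true)
      have hstep : pvBFSstep (q, vis) i = (q, vis) := by
        unfold pvBFSstep; rw [if_neg (by simp [h])]
      obtain ⟨G1, G2, G3, G4, G5, G6⟩ := ih hns' q vis C1 C2 C3
      rw [List.foldl_cons, hstep]
      refine ⟨G1, G2, G3, ?_, G5, G6⟩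
      intro j hj
      rcases List.mem_cons.mp hj with heq | hj'
      · subst heq
        -- j is a target of the reachable s, hence a good symbol, hence a key
        have hgood : pvGoodS j = true := hPre2 s hRs j hEi
        have hkey : j ∈ pvKeyList := by
          apply List.mem_append_left
          simpa [pvGoodS] using hgood
        have hcont : vis.contains j = true := (C3 j).mpr hkey
        rw [PySem.Dict.contains_eq_isSome_get?] at hcont
        cases hgj : vis.get? j with
        | none => rw [hgj] at hcont; cases hcont
        | some b =>
          cases b
          · exfalso
            apply h
            rw [PySem.Dict.getD_eq_get?_getD, hgj]
            rfl
          · exact G5 j hgj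
      · exact G4 j hj'

theorem pv_final (grammars : List (List String)) (vis : PySem.Dict String Bool)
    (reachable : List String)
    (C1 : ∀ x, vis.get? x = some true ↔ (x ∈ reachable ∨ x ∈ ([] : List String)))
    (C2 : ∀ x, (x ∈ reachable ∨ x ∈ ([] : List String)) → pvRch grammars x)
    (C4 : ∀ u ∈ reachable, ∀ v, pvEdge grammars u v → vis.get? v = some true)
    (CS : "S" ∈ reachable ∨ "S" ∈ ([] : List String)) :
    ∀ x, x ∈ reachable ↔ pvRch grammars x := by
  intro x
  constructor
  · exact fun hx => C2 x (Or.inl hx)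
  · intro hx
    induction hx with
    | refl =>
      rcases CS with h | h
      · exact h
      · cases h
    | tail hr e ih =>
      have := C4 _ ih _ e
      rcases (C1 _).mp this with h | h
      · exact h
      · cases h

theorem pv_loop (grammars : List (List String))
    (hPre2 : ∀ u, pvRch grammars u → ∀ v ∈ pvTgts grammars u, pvGoodS v = true) :
    ∀ (fuel : Nat) (vis : PySem.Dict String Bool) (q reachable : List String),
      (∀ x, vis.get? x = some true ↔ (x ∈ reachable ∨ x ∈ q)) →
      (∀ x, (x ∈ reachable ∨ x ∈ q) → pvRch grammars x) →
      (∀ x, vis.contains x = true ↔ x ∈ pvKeyList) →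
      (∀ u ∈ reachable, ∀ v, pvEdge grammars u v → vis.get? v = some true) →
      ("S" ∈ reachable ∨ "S" ∈ q) →
      2 * pvFC vis + q.length ≤ fuel →
      ∀ x, x ∈ pvBFSloop (pvBuildGraph grammars) fuel vis q reachable ↔ pvRch grammars x := by
  intro fuel
  induction fuel with
  | zero =>
    intro vis q reachable C1 C2 C3 C4 CS hμ x
    have hq : q = [] := List.eq_nil_of_length_eq_zero (by omega)
    subst hq
    exact pv_final grammars vis reachable C1 C2 C4 CS x
  | succ fuel ih =>
    intro vis q reachable C1 C2 C3 C4 CS hμ x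
    cases q with
    | nil =>
      exact pv_final grammars vis reachable C1 C2 C4 CS x
    | cons s rest =>
      have hRs : pvRch grammars s := C2 s (Or.inr List.mem_cons_self)
      have hns : ∀ i ∈ (pvBuildGraph grammars).getD s PySem.Set.empty, pvEdge grammars s i :=
        fun i hi => (pv_mem_graph grammars s i).mp hi
      have F1 : ∀ y, vis.get? y = some true ↔ (y ∈ reachable ++ [s] ∨ y ∈ rest) := by
        intro y
        rw [C1 y]
        simp only [List.mem_append, List.mem_cons]
        tauto
      have F2 : ∀ y ∈ rest, pvRch grammars y :=
        fun y hy => C2 y (Or.inr (List.mem_cons_of_mem _ hy))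
      obtain ⟨G1, G2, G3, G4, G5, G6⟩ :=
        pv_fold grammars hPre2 s hRs (reachable ++ [s])
          ((pvBuildGraph grammars).getD s PySem.Set.empty) hns rest vis F1 F2 C3
      show x ∈ pvBFSloop (pvBuildGraph grammars) fuel
          (((pvBuildGraph grammars).getD s PySem.Set.empty).foldl pvBFSstep (rest, vis)).2
          (((pvBuildGraph grammars).getD s PySem.Set.empty).foldl pvBFSstep (rest, vis)).1
          (reachable ++ [s]) ↔ pvRch grammars x
      apply ih _ _ _ G1 ?_ G3 ?_ ?_ ?_
      · intro y hy
        rcases hy with hy | hy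
        · rcases List.mem_append.mp hy with h1 | h1
          · exact C2 y (Or.inl h1)
          · simp only [List.mem_singleton] at h1; subst h1; exact hRs
        · exact G2 y hy
      · intro u hu v e
        rcases List.mem_append.mp hu with h1 | h1
        · exact G5 v (C4 u h1 v e)
        · simp only [List.mem_singleton] at h1; subst h1
          exact G4 v ((pv_mem_graph grammars u v).mpr e)
      · rcases CS with hS | hS
        · exact Or.inl (List.mem_append_left _ hS)
        · rcases List.mem_cons.mp hS with heq | hS'
          · subst heq; exact Or.inl (List.mem_append_right _ List.mem_cons_self)
          · exact Or.inr ((pv_fold_q_prefix _ rest vis).subset hS')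
      · simp only [List.length_cons] at hμ
        omega

theorem pv_A_iff (grammars : List (List String))
    (hPre2 : ∀ u, pvRch grammars u → ∀ v ∈ pvTgts grammars u, pvGoodS v = true) :
    ∀ x, x ∈ pvBFSloop (pvBuildGraph grammars) 100
        (pvVisited0.insert "S" true) ["S"] [] ↔ pvRch grammars x := by
  apply pv_loop grammars hPre2 100 (pvVisited0.insert "S" true) ["S"] []
  · intro x
    rw [pv_init_get?_true]
    simp
  · intro x hx
    have hxS : x = "S" := by
      rcases hx with h | h
      · cases h
      · simpa using h
    subst hxS
    exact Relation.ReflTransGen.refl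
  · exact pv_init_contains
  · intro u hu; cases hu
  · exact Or.inr List.mem_cons_self
  · have := pv_fc_le (pvVisited0.insert "S" true)
    simp only [List.length_cons, List.length_nil]
    omega

-- A's append-loop over the grammar is a filter
theorem pv_foldl_filter (p : List String → Bool) :
    ∀ (l : List (List String)) (acc : List (List String)),
      l.foldl (fun lst rule => if p rule then lst ++ [rule] else lst) acc = acc ++ l.filter p := by
  intro l
  induction l with
  | nil => intro acc; simp
  | cons r l ih =>
    intro acc
    rw [List.foldl_cons, List.filter_cons]
    by_cases h : p r = true
    · rw [if_pos h, if_pos h, ih]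
      simp
    · rw [if_neg h, ih]
      simp [h]

theorem pv_contains_congr (l1 l2 : List String) (a : String) (h : a ∈ l1 ↔ a ∈ l2) :
    l1.contains a = l2.contains a := by
  by_cases h1 : a ∈ l1
  · simp [h1, h.mp h1]
  · have h2 : a ∉ l2 := fun hh => h1 (h.mpr hh)
    simp [h1, h2]

-- ===== VERDICT (by name: the statement is the Claim_ definition above) =====
theorem delete_unreachable_variable_form_s_spec : Claim_equal_delete_unreachable_variable_form_s := by
  intro grammars _hDom hPre
  unfold Spec_delete_unreachable_variable_form_s
  have hPre2 : ∀ u, pvRch grammars u → ∀ v ∈ pvTgts grammars u, pvGoodS v = true :=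
    fun u hu => hPre.2 u ((pvReach_iff grammars u).mpr hu)
  show (grammars.foldl (fun lst rule =>
      if (pvBFSloop (pvBuildGraph grammars) 100 (pvVisited0.insert "S" true) ["S"] []).contains
          (rule.headD "") then lst ++ [rule] else lst) []) =
    grammars.filter (fun rule =>
      PySem.Set.contains ((List.range 26).foldl (fun r _ => pvPassB grammars r)
        (PySem.Set.ofList ["S"])) (rule.headD ""))
  rw [pv_foldl_filter, List.nil_append, pv_range_foldl]
  apply List.filter_congr
  intro rule _
  have hof : PySem.Set.ofList ["S"] = ["S"] := by decide
  rw [hof]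
  have hiff : rule.headD "" ∈
      pvBFSloop (pvBuildGraph grammars) 100 (pvVisited0.insert "S" true) ["S"] [] ↔
      rule.headD "" ∈ (pvPassB grammars)^[26] ["S"] :=
    (pv_A_iff grammars hPre2 _).trans (pv_B_iff grammars hPre2 _).symm
  rw [pv_contains_congr _ _ _ hiff]
  rfl
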